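-- pv_equiv track=rewrite | github.com/smilefabri/School_ITIS | SISTEMI-RETI/2019_2020/esercizi/Robot-school/scripts/code.py | bool_to_int
-- ===== SOURCE A (Python) =====
-- def controllo(Element) -> bool:
--     if Element == True:
--         return True
--     else:
--         return False
--
-- def bool_to_int(matrix)-> list:
--     n_Node = 1
--     temp_matrix = []
--     for x in matrix:
--         path_dict = []
--         for y in x:
--             if(controllo(y)== True):
--                 path_dict.append(n_Node)
--                 n_Node+=1
--             else:
--                 path_dict.append(-1)
--         temp_matrix.append(path_dict)
--
--     return temp_matrix
-- ===== SOURCE B (Python) =====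
-- def bool_to_int(matrix) -> list:
--     # mask -> cumulative scan -> reshape pipeline
--     lengths = [len(row) for row in matrix]
--     mask = [y == True for row in matrix for y in row]
--     ids = []
--     c = 0
--     for m in mask:
--         if m:
--             c += 1
--             ids.append(c)
--         else:
--             ids.append(-1)
--     out = []
--     for L in lengths:
--         out.append(ids[:L])
--         ids = ids[L:]
--     return out
-- ===== Notes on version B (the rewrite author's own statement) =====
-- stated objective: alternative
-- what changed: Replaces A's nested loops with a shared mutable counter by a three-stage pipeline: flatten to a boolean mask, one cumulative scan assigning 1-based ids, then reshape the flat id list back into rows by slicing off each recorded row length.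
import Mathlib
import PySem

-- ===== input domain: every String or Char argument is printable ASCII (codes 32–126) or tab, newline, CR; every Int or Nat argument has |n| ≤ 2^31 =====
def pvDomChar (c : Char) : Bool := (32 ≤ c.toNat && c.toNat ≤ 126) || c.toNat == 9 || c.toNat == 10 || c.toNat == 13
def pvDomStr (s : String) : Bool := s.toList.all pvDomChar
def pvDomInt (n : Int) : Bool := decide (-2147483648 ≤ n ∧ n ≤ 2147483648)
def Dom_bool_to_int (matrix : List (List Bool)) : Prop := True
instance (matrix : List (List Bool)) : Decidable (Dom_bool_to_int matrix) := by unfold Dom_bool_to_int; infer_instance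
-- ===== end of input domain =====

-- B replaces A's nested loops with a shared counter by a mask → cumulative-scan → reshape pipeline (alternative decomposition, same cost).


-- ===== PORT A =====
def controllo (Element : Bool) : Bool :=
  if Element == true then true else false

-- body of A's inner loop (over y in x)
def stepA_inner (s : Int × List Int) (y : Bool) : Int × List Int :=
  if controllo y == true then (s.1 + 1, s.2 ++ [s.1]) else (s.1, s.2 ++ [(-1 : Int)])

-- body of A's outer loop (over x in matrix)
def stepA_outer (st : Int × List (List Int)) (x : List Bool) : Int × List (List Int) :=
  let inner := x.foldl stepA_inner (st.1, ([] : List Int))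
  (inner.1, st.2 ++ [inner.2])

def bool_to_int (matrix : List (List Bool)) : List (List Int) :=
  (matrix.foldl stepA_outer ((1 : Int), ([] : List (List Int)))).2

-- ===== PORT B =====
-- the flat mask: y == True for every element, rows flattened
def maskOf (matrix : List (List Bool)) : List Bool :=
  matrix.flatMap (fun row => row.map (fun y => y == true))

-- body of B's cumulative-scan loop
def stepScan (s : Int × List Int) (m : Bool) : Int × List Int :=
  if m then (s.1 + 1, s.2 ++ [s.1 + 1]) else (s.1, s.2 ++ [(-1 : Int)])

-- body of B's reshape loop: out.append(ids[:L]); ids = ids[L:]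
def stepReshape (s : List Int × List (List Int)) (L : Int) : List Int × List (List Int) :=
  (PySem.List.slice s.1 (some L) none, s.2 ++ [PySem.List.slice s.1 none (some L)])

def bool_to_int_alt (matrix : List (List Bool)) : List (List Int) :=
  let lengths := matrix.map (fun row => (row.length : Int))
  let ids := ((maskOf matrix).foldl stepScan ((0 : Int), ([] : List Int))).2
  (lengths.foldl stepReshape (ids, ([] : List (List Int)))).2

-- ===== PRECONDITION & SPEC =====
def Spec_bool_to_int (matrix : List (List Bool)) (out : List (List Int)) : Prop := out = bool_to_int_alt matrix
instance (matrix : List (List Bool)) (out : List (List Int)) : Decidable (Spec_bool_to_int matrix out) := by unfold Spec_bool_to_int; infer_instance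

-- ===== CLAIM (what is proved, stated in full; the proofs are below) =====
def Claim_equal_bool_to_int : Prop := ∀ (matrix : List (List Bool)), Dom_bool_to_int matrix → Spec_bool_to_int matrix (bool_to_int matrix)

-- ===== LEMMAS AND PROOFS =====

-- reference: ids of one row with the counter starting at n
def rIds (n : Int) : List Bool → List Int
  | [] => []
  | y :: ys => if y then n :: rIds (n + 1) ys else (-1) :: rIds n ys

def cnt : List Bool → Int
  | [] => 0
  | y :: ys => (if y then 1 else 0) + cnt ys

def mats (n : Int) : List (List Bool) → List (List Int)
  | [] => []
  | x :: xs => rIds n x :: mats (n + cnt x) xs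

def tcnt : List (List Bool) → Int
  | [] => 0
  | x :: xs => cnt x + tcnt xs

def fIds (n : Int) : List (List Bool) → List Int
  | [] => []
  | x :: xs => rIds n x ++ fIds (n + cnt x) xs

theorem length_rIds (n : Int) (l : List Bool) : (rIds n l).length = l.length := by
  induction l generalizing n with
  | nil => rfl
  | cons y ys ih => cases y <;> simp [rIds, ih]

theorem rIds_append (n : Int) (a b : List Bool) :
    rIds n (a ++ b) = rIds n a ++ rIds (n + cnt a) b := by
  induction a generalizing n with
  | nil => simp [rIds, cnt]
  | cons y ys ih =>
    cases y
    · simp [rIds, cnt, ih]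
    · simp [rIds, cnt, ih, add_assoc]

theorem A_inner (x : List Bool) (n : Int) (acc : List Int) :
    x.foldl stepA_inner (n, acc) = (n + cnt x, acc ++ rIds n x) := by
  induction x generalizing n acc with
  | nil => simp [cnt, rIds]
  | cons y ys ih =>
    rw [List.foldl_cons]
    cases y
    · rw [show stepA_inner (n, acc) false = (n, acc ++ [(-1 : Int)]) from rfl, ih]
      simp [cnt, rIds]
    · rw [show stepA_inner (n, acc) true = (n + 1, acc ++ [n]) from rfl, ih]
      simp [cnt, rIds, add_assoc]

theorem A_outer (ms : List (List Bool)) (n : Int) (acc : List (List Int)) :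
    ms.foldl stepA_outer (n, acc) = (n + tcnt ms, acc ++ mats n ms) := by
  induction ms generalizing n acc with
  | nil => simp [tcnt, mats]
  | cons x xs ih =>
    rw [List.foldl_cons]
    have h : stepA_outer (n, acc) x = (n + cnt x, acc ++ [rIds n x]) := by
      simp [stepA_outer, A_inner]
    rw [h, ih]
    simp [tcnt, mats, add_assoc]

theorem B_scan (l : List Bool) (c : Int) (acc : List Int) :
    l.foldl stepScan (c, acc) = (c + cnt l, acc ++ rIds (c + 1) l) := by
  induction l generalizing c acc with
  | nil => simp [cnt, rIds]
  | cons y ys ih =>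
    rw [List.foldl_cons]
    cases y
    · rw [show stepScan (c, acc) false = (c, acc ++ [(-1 : Int)]) from rfl, ih]
      simp [cnt, rIds]
    · rw [show stepScan (c, acc) true = (c + 1, acc ++ [c + 1]) from rfl, ih]
      simp [cnt, rIds, add_assoc]

theorem rIds_mask (ms : List (List Bool)) (n : Int) :
    rIds n (maskOf ms) = fIds n ms := by
  induction ms generalizing n with
  | nil => simp [maskOf, rIds, fIds]
  | cons x xs ih =>
    have hmask : x.map (fun y => y == true) = x := by simp
    simp only [maskOf, List.flatMap_cons] at *
    rw [hmask, rIds_append, ih, fIds]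

theorem reshape (ms : List (List Bool)) (n : Int) (rest : List Int) (acc : List (List Int)) :
    (ms.map (fun row => (row.length : Int))).foldl stepReshape (fIds n ms ++ rest, acc)
      = (rest, acc ++ mats n ms) := by
  induction ms generalizing n rest acc with
  | nil => simp [fIds, mats]
  | cons x xs ih =>
    rw [List.map_cons, List.foldl_cons]
    have h : stepReshape (fIds n (x :: xs) ++ rest, acc) (x.length : Int)
        = (fIds (n + cnt x) xs ++ rest, acc ++ [rIds n x]) := by
      simp only [stepReshape, fIds, List.append_assoc,
        PySem.List.slice_from_natCast, PySem.List.slice_to_natCast]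
      rw [← length_rIds n x, List.take_left, List.drop_left]
    rw [h, ih]
    simp [mats]

-- ===== VERDICT (by name: the statement is the Claim_ definition above) =====
theorem bool_to_int_spec : Claim_equal_bool_to_int := by
  intro matrix _
  unfold Spec_bool_to_int bool_to_int bool_to_int_alt
  rw [A_outer, B_scan]
  simp only [List.nil_append, zero_add]
  rw [rIds_mask]
  have h := reshape matrix 1 [] []
  rw [List.append_nil] at h
  rw [h]
  simp
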